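-- pv_equiv track=rewrite | github.com/KohsukeIde/3D-NEPA | nepa3d/tracks/kplane/analysis/eval_udfdist_worldv3_controls.py | _pick_donor_indices
-- ===== SOURCE A (Python) =====
-- from typing import Any, Dict, List
--
-- def _pick_donor_indices(samples: List[Dict[str, Any]], mode: str) -> List[int | None]:
--     synsets = [str(s.get("synset", "")) for s in samples]
--     donors: List[int | None] = []
--     for i, syn in enumerate(synsets):
--         donor = None
--         for j in range(len(samples)):
--             if i == j:
--                 continue
--             same = synsets[j] == syn
--             if mode == "wrong_shape_same_synset" and same:
--                 donor = j
--                 break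
--             if mode == "wrong_shape_other_synset" and not same:
--                 donor = j
--                 break
--         donors.append(donor)
--     return donors
-- ===== SOURCE B (Python) =====
-- from typing import Any, Dict, List
--
-- def _pick_donor_indices(samples: List[Dict[str, Any]], mode: str) -> List[int | None]:
--     synsets = [str(s.get("synset", "")) for s in samples]
--     n = len(synsets)
--     if mode == "wrong_shape_same_synset":
--         # one pass: first two occurrence indices per synset
--         info = {}
--         for i, syn in enumerate(synsets):
--             cur = info.get(syn)
--             if cur is None:
--                 info[syn] = (i, None)
--             elif cur[1] is None:
--                 info[syn] = (cur[0], i)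
--         out = []
--         for i, syn in enumerate(synsets):
--             f, s2 = info[syn]
--             out.append(f if f != i else s2)
--         return out
--     if mode == "wrong_shape_other_synset":
--         if n == 0:
--             return []
--         s0 = synsets[0]
--         d = None
--         for j, s in enumerate(synsets):
--             if s != s0:
--                 d = j
--                 break
--         return [0 if syn != s0 else d for syn in synsets]
--     return [None] * n
-- ===== Notes on version B (the rewrite author's own statement) =====
-- stated objective: faster
-- what changed: A rescans the whole sample list for every sample (nested loops); B makes one pass recording the first two occurrence indices of each synset in a dict (same-synset mode) or the first index with a differing synset (other-synset mode), then answers every query in O(1).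
import Mathlib
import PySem

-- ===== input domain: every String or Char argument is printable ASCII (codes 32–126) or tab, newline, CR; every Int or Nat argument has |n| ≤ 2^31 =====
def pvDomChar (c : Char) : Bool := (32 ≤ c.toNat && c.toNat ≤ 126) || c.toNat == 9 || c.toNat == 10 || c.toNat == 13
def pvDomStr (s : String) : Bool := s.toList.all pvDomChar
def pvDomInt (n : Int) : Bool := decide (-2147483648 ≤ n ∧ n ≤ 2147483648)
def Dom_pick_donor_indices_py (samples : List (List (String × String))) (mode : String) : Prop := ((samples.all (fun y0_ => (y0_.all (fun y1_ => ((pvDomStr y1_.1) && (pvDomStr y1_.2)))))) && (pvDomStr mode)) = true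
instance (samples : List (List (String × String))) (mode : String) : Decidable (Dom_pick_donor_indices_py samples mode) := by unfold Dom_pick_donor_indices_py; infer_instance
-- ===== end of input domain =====

-- B replaces A's quadratic scan (for each i, rescan all j) by one pass that records the
-- first two occurrence indices of every synset (same-synset mode) resp. the first index
-- with a differing synset (other-synset mode); objective: faster (asymptotic, O(n^2) → O(n)).

-- ===== PORT A =====
-- str(s.get("synset", "")) — the dict values are strings here, so str() is the identity
def pvSynset (s : List (String × String)) : String := (PySem.Dict.mk s).getD "synset" ""

-- the inner 'for j in range(len(samples))' with its two breaks
def pvA_loop (synsets : List String) (mode : String) (i : Nat) (syn : String) : List Nat → Option Int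
  | [] => none
  | j :: rest =>
    if i = j then pvA_loop synsets mode i syn rest
    else
      -- synsets[j]: j always in range here, so getD is exact
      let same := synsets.getD j "" == syn
      if mode == "wrong_shape_same_synset" && same then some (j : Int)
      else if mode == "wrong_shape_other_synset" && !same then some (j : Int)
      else pvA_loop synsets mode i syn rest

def pick_donor_indices_py (samples : List (List (String × String))) (mode : String) : List (Option Int) :=
  let synsets := samples.map pvSynset
  synsets.zipIdx.map (fun p => pvA_loop synsets mode p.2 p.1 (List.range samples.length))

-- ===== PORT B =====
-- one pass recording the first two occurrence indices of each synset
def pvFirstTwo : List (String × Nat) → PySem.Dict String (Nat × Option Nat) → PySem.Dict String (Nat × Option Nat)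
  | [], d => d
  | p :: rest, d =>
    match d.get? p.1 with
    | none => pvFirstTwo rest (d.insert p.1 (p.2, none))
    | some (f, none) => pvFirstTwo rest (d.insert p.1 (f, some p.2))
    | some _ => pvFirstTwo rest d

-- first index whose synset differs from s0 (the loop with break)
def pvFirstDiff (s0 : String) : List String → Nat → Option Nat
  | [], _ => none
  | s :: rest, k => if s ≠ s0 then some k else pvFirstDiff s0 rest (k + 1)

def pick_donor_indices_py_alt (samples : List (List (String × String))) (mode : String) : List (Option Int) :=
  let synsets := samples.map pvSynset
  if mode == "wrong_shape_same_synset" then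
    let info := pvFirstTwo synsets.zipIdx PySem.Dict.empty
    synsets.zipIdx.map (fun p =>
      match info.get? p.1 with
      | some (f, s2) => if f ≠ p.2 then some (f : Int) else s2.map (fun x => (x : Int))
      | none => none)  -- unreachable: every synset was inserted into info
  else if mode == "wrong_shape_other_synset" then
    match synsets with
    | [] => []
    | s0 :: _ =>
      let d := (pvFirstDiff s0 synsets 0).map (fun x => (x : Int))
      synsets.map (fun syn => if syn ≠ s0 then some (0 : Int) else d)
  else
    List.replicate synsets.length none

-- ===== PRECONDITION & SPEC =====
def Spec_pick_donor_indices_py (samples : List (List (String × String))) (mode : String) (out : List (Option Int)) : Prop := out = pick_donor_indices_py_alt samples mode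
instance (samples : List (List (String × String))) (mode : String) (out : List (Option Int)) : Decidable (Spec_pick_donor_indices_py samples mode out) := by unfold Spec_pick_donor_indices_py; infer_instance

-- ===== CLAIM (what is proved, stated in full; the proofs are below) =====
def Claim_equal_pick_donor_indices_py : Prop := ∀ (samples : List (List (String × String))) (mode : String), Dom_pick_donor_indices_py samples mode → Spec_pick_donor_indices_py samples mode (pick_donor_indices_py samples mode)

-- ===== LEMMAS AND PROOFS =====

lemma pv_find?_congr {α : Type} (p q : α → Bool) :
    ∀ (l : List α), (∀ a ∈ l, p a = q a) → l.find? p = l.find? q := by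
  intro l
  induction l with
  | nil => intro _; rfl
  | cons x xs ih =>
    intro h
    simp only [List.find?]
    rw [h x (by simp)]
    cases q x with
    | true => rfl
    | false => exact ih (fun a ha => h a (by simp [ha]))

-- the predicate A's inner loop effectively searches with
def pvCond (mode : String) (synsets : List String) (syn : String) (j : Nat) : Bool :=
  if mode == "wrong_shape_same_synset" then synsets.getD j "" == syn
  else if mode == "wrong_shape_other_synset" then !(synsets.getD j "" == syn)
  else false

lemma pvA_loop_eq_find? (synsets : List String) (mode : String) (i : Nat) (syn : String) :
    ∀ js, pvA_loop synsets mode i syn js =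
      (js.find? (fun j => !(i == j) && pvCond mode synsets syn j)).map (fun j => (j : Int)) := by
  intro js
  induction js with
  | nil => rfl
  | cons j rest ih =>
    rw [List.find?_cons]
    by_cases hij : i = j
    · have hP : (!(i == j) && pvCond mode synsets syn j) = false := by
        simp [hij]
      rw [hP]
      simpa only [pvA_loop, if_pos hij] using ih
    · have hP : (!(i == j) && pvCond mode synsets syn j) = pvCond mode synsets syn j := by
        simp [hij]
      rw [hP]
      simp only [pvA_loop, if_neg hij]
      by_cases h1 : mode = "wrong_shape_same_synset"
      · subst h1
        by_cases hs : synsets[j]?.getD "" = syn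
        · have hsb : (synsets[j]?.getD "" == syn) = true := by simp [hs]
          simp [pvCond, hs, hsb, List.getD]
        · have hsb : (synsets[j]?.getD "" == syn) = false := by simp [hs]
          simp [pvCond, hs, hsb, ih, List.getD]
      · by_cases h2 : mode = "wrong_shape_other_synset"
        · subst h2
          by_cases hs : synsets[j]?.getD "" = syn
          · have hsb : (synsets[j]?.getD "" == syn) = true := by simp [hs]
            simp [pvCond, h1, hs, hsb, ih, List.getD]
          · have hsb : (synsets[j]?.getD "" == syn) = false := by simp [hs]
            simp [pvCond, h1, hs, hsb, List.getD]
        · simp [pvCond, h1, h2, ih]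

lemma pv_zipIdx_getD (synsets : List String) :
    ∀ p ∈ synsets.zipIdx, synsets[p.2]?.getD "" = p.1 ∧ p.2 < synsets.length := by
  intro p hp
  obtain ⟨x, i⟩ := p
  have h := List.mem_zipIdx hp
  refine ⟨?_, by omega⟩
  have : synsets[i]? = some x := by
    rw [List.getElem?_eq_getElem (by omega)]
    simp [h.2.2]
  simp [this]

lemma pv_zipIdx_snd_nodup (synsets : List String) : (synsets.zipIdx.map Prod.snd).Nodup := by
  rw [List.zipIdx_map_snd]
  exact (List.nodup_range' ).sublist (by rfl)

lemma pv_range_eq_zipIdx_snd (synsets : List String) :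
    List.range synsets.length = synsets.zipIdx.map Prod.snd := by
  rw [List.zipIdx_map_snd, List.range_eq_range']

lemma pv_find?_range_eq (synsets : List String) (P : Nat → Bool) (Q : String × Nat → Bool)
    (hQ : ∀ q ∈ synsets.zipIdx, Q q = P q.2) :
    (List.range synsets.length).find? P = (synsets.zipIdx.find? Q).map Prod.snd := by
  rw [pv_range_eq_zipIdx_snd, List.find?_map]
  congr 1
  exact pv_find?_congr _ _ _ (fun q hq => by simpa using (hQ q hq).symm)

lemma pvFirstDiff_eq (s0 : String) :
    ∀ (l : List String) (k : Nat),
      pvFirstDiff s0 l k = ((l.zipIdx k).find? (fun q => !(q.1 == s0))).map Prod.snd := by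
  intro l
  induction l with
  | nil => intro k; rfl
  | cons s rest ih =>
    intro k
    rw [List.zipIdx_cons, List.find?_cons]
    by_cases hs : s = s0
    · have hb : (!((s, k).1 == s0)) = false := by simp [hs]
      rw [hb]
      simpa [pvFirstDiff, hs] using ih (k + 1)
    · have hb : (!((s, k).1 == s0)) = true := by simp [hs]
      rw [hb]
      simp [pvFirstDiff, hs]

lemma pvFirstTwo_get? (syn : String) :
    ∀ (l : List (String × Nat)) (d : PySem.Dict String (Nat × Option Nat)),
      (pvFirstTwo l d).get? syn =
        match d.get? syn, (l.filter (fun q => q.1 == syn)).map Prod.snd with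
        | some (f, some s), _ => some (f, some s)
        | some (f, none), ls => some (f, ls.head?)
        | none, [] => none
        | none, [a] => some (a, none)
        | none, (a :: b :: _) => some (a, some b) := by
  intro l
  induction l with
  | nil =>
    intro d
    simp only [pvFirstTwo, List.filter_nil, List.map_nil]
    rcases h : d.get? syn with _ | ⟨f, _ | s⟩ <;> simp
  | cons p rest ih =>
    intro d
    obtain ⟨ps, pn⟩ := p
    by_cases hps : ps = syn
    · subst hps
      rcases hd : d.get? ps with _ | ⟨f, _ | s⟩
      · have hstep : pvFirstTwo ((ps, pn) :: rest) d = pvFirstTwo rest (d.insert ps (pn, none)) := by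
          simp only [pvFirstTwo, hd]
        rw [hstep, ih, PySem.Dict.get?_insert_self]
        simp only [hd, List.filter_cons, BEq.rfl, if_true, List.map_cons]
        cases hls : (List.filter (fun q => q.1 == ps) rest).map Prod.snd <;> simp
      · have hstep : pvFirstTwo ((ps, pn) :: rest) d = pvFirstTwo rest (d.insert ps (f, some pn)) := by
          simp only [pvFirstTwo, hd]
        rw [hstep, ih, PySem.Dict.get?_insert_self]
        simp [hd, List.filter_cons]
      · have hstep : pvFirstTwo ((ps, pn) :: rest) d = pvFirstTwo rest d := by
          simp only [pvFirstTwo, hd]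
        rw [hstep, ih]
        simp [hd, List.filter_cons]
    · have hfilter : List.filter (fun q => q.1 == syn) ((ps, pn) :: rest)
          = List.filter (fun q => q.1 == syn) rest := by
        simp [List.filter_cons, hps]
      have hne : syn ≠ ps := fun h => hps h.symm
      rcases hd : d.get? ps with _ | ⟨f, _ | s⟩
      · have hstep : pvFirstTwo ((ps, pn) :: rest) d = pvFirstTwo rest (d.insert ps (pn, none)) := by
          simp only [pvFirstTwo, hd]
        rw [hstep, ih, PySem.Dict.get?_insert_of_ne _ _ hne, hfilter]
      · have hstep : pvFirstTwo ((ps, pn) :: rest) d = pvFirstTwo rest (d.insert ps (f, some pn)) := by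
          simp only [pvFirstTwo, hd]
        rw [hstep, ih, PySem.Dict.get?_insert_of_ne _ _ hne, hfilter]
      · have hstep : pvFirstTwo ((ps, pn) :: rest) d = pvFirstTwo rest d := by
          simp only [pvFirstTwo, hd]
        rw [hstep, ih, hfilter]

lemma pv_filter_snd_nodup (synsets : List String) (q : String × Nat → Bool) :
    ((synsets.zipIdx.filter q).map Prod.snd).Nodup := by
  have hsub : List.Sublist ((synsets.zipIdx.filter q).map Prod.snd) (synsets.zipIdx.map Prod.snd) :=
    List.Sublist.map _ List.filter_sublist
  exact (pv_zipIdx_snd_nodup synsets).sublist hsub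

-- per-element equality in the same-synset mode
lemma pv_same_elem (synsets : List String) (p : String × Nat) (hp : p ∈ synsets.zipIdx) :
    ((List.range synsets.length).find?
        (fun j => !(p.2 == j) && pvCond "wrong_shape_same_synset" synsets p.1 j)).map
      (fun j => (j : Int))
    = (match (pvFirstTwo synsets.zipIdx PySem.Dict.empty).get? p.1 with
        | some (f, s2) => if f ≠ p.2 then some (f : Int) else s2.map (fun x => (x : Int))
        | none => none) := by
  have hconv : (List.range synsets.length).find?
        (fun j => !(p.2 == j) && pvCond "wrong_shape_same_synset" synsets p.1 j)
      = ((synsets.zipIdx.filter (fun q => q.1 == p.1)).find? (fun q => !(p.2 == q.2))).map Prod.snd := by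
    rw [pv_find?_range_eq synsets _ (fun q => !(p.2 == q.2) && (q.1 == p.1))
        (fun q hq => by
          have hgd := (pv_zipIdx_getD synsets q hq).1
          simp [pvCond, hgd, List.getD])]
    rw [List.find?_filter]
    congr 1
    apply pv_find?_congr
    intro q _
    by_cases h1 : q.1 = p.1 <;> by_cases h2 : p.2 = q.2 <;> simp [h1, h2]
  rw [hconv, pvFirstTwo_get? p.1 synsets.zipIdx PySem.Dict.empty, PySem.Dict.get?_empty]
  have hnd : ((synsets.zipIdx.filter (fun q => q.1 == p.1)).map Prod.snd).Nodup :=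
    pv_filter_snd_nodup synsets _
  rcases hE : synsets.zipIdx.filter (fun q => q.1 == p.1) with _ | ⟨e0, E'⟩
  · rw [hE]
    simp
  · rw [hE] at hnd ⊢
    rcases E' with _ | ⟨e1, E''⟩
    · simp only [List.map_cons, List.map_nil, List.find?_cons]
      by_cases h0 : e0.2 = p.2
      · have hb : (!(p.2 == e0.2)) = false := by simp [h0]
        rw [hb]
        simp [h0]
      · have hne : p.2 ≠ e0.2 := Ne.symm h0
        have hb : (!(p.2 == e0.2)) = true := by simp [hne]
        rw [hb]
        simp [Ne.symm hne]
    · simp only [List.map_cons, List.find?_cons]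
      by_cases h0 : e0.2 = p.2
      · have hb : (!(p.2 == e0.2)) = false := by simp [h0]
        rw [hb]
        have h1 : e1.2 ≠ p.2 := by
          simp only [List.map_cons, List.nodup_cons, List.mem_cons] at hnd
          intro h
          exact hnd.1 (by simp [h0, h])
        have hb1 : (!(p.2 == e1.2)) = true := by simp [Ne.symm h1]
        rw [hb1]
        simp [h0]
      · have hne : p.2 ≠ e0.2 := Ne.symm h0
        have hb : (!(p.2 == e0.2)) = true := by simp [hne]
        rw [hb]
        simp [Ne.symm hne]

-- per-element equality in the other-synset mode
lemma pv_other_elem (s0 : String) (tail : List String) (p : String × Nat)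
    (hp : p ∈ (s0 :: tail).zipIdx) :
    ((List.range (s0 :: tail).length).find?
        (fun j => !(p.2 == j) && pvCond "wrong_shape_other_synset" (s0 :: tail) p.1 j)).map
      (fun j => (j : Int))
    = (if p.1 ≠ s0 then some (0 : Int)
       else (pvFirstDiff s0 (s0 :: tail) 0).map (fun x => (x : Int))) := by
  have hgd0 : (s0 :: tail)[0]?.getD "" = s0 := rfl
  have hgdp := pv_zipIdx_getD _ p hp
  by_cases hps : p.1 = s0
  · -- the predicate agrees with (fun j => getD j ≠ s0) at every j
    have hpred : ∀ j, (!(p.2 == j) && pvCond "wrong_shape_other_synset" (s0 :: tail) p.1 j)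
        = !((s0 :: tail)[j]?.getD "" == s0) := by
      intro j
      by_cases hj : j = p.2
      · subst hj
        simp [pvCond, hgdp.1, hps]
      · have hne : p.2 ≠ j := Ne.symm hj
        simp [pvCond, hps, hne]
    have : ((List.range (s0 :: tail).length).find?
        (fun j => !(p.2 == j) && pvCond "wrong_shape_other_synset" (s0 :: tail) p.1 j))
        = (List.range (s0 :: tail).length).find? (fun j => !((s0 :: tail)[j]?.getD "" == s0)) :=
      pv_find?_congr _ _ _ (fun j _ => hpred j)
    rw [this, if_neg (by simp [hps])]
    rw [pvFirstDiff_eq s0 (s0 :: tail) 0]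
    rw [pv_find?_range_eq (s0 :: tail) _ (fun q => !(q.1 == s0))
        (fun q hq => by
          have hgd := (pv_zipIdx_getD _ q hq).1
          simp [hgd])]
  · -- p.1 ≠ s0: index 0 qualifies (and p.2 ≠ 0)
    have hp2 : p.2 ≠ 0 := by
      intro h
      apply hps
      rw [← hgdp.1, h]
      exact hgd0
    rw [if_pos hps]
    have hrange : List.range (s0 :: tail).length = 0 :: (List.range tail.length).map Nat.succ := by
      simp [List.range_succ_eq_map]
    rw [hrange, List.find?_cons]
    have hb : (!(p.2 == 0) && pvCond "wrong_shape_other_synset" (s0 :: tail) p.1 0) = true := by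
      have hne : s0 ≠ p.1 := Ne.symm hps
      simp [pvCond, hp2, hgd0, hne]
    rw [hb]
    rfl

theorem pv_main : ∀ (samples : List (List (String × String))) (mode : String),
    pick_donor_indices_py samples mode = pick_donor_indices_py_alt samples mode := by
  intro samples mode
  unfold pick_donor_indices_py pick_donor_indices_py_alt
  have hlen : List.range samples.length = List.range (samples.map pvSynset).length := by
    simp
  rw [hlen]
  set synsets := samples.map pvSynset with hsyn
  clear_value synsets
  by_cases h1 : mode = "wrong_shape_same_synset"
  · subst h1
    rw [if_pos (by simp)]
    apply List.map_congr_left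
    intro p hp
    rw [pvA_loop_eq_find? synsets _ p.2 p.1]
    exact pv_same_elem synsets p hp
  · by_cases h2 : mode = "wrong_shape_other_synset"
    · subst h2
      rw [if_neg (by simp), if_pos (by simp)]
      rcases synsets with _ | ⟨s0, tail⟩
      · rfl
      · dsimp only
        have hmap : ((s0 :: tail).map (fun syn => if syn ≠ s0 then some (0 : Int)
            else (pvFirstDiff s0 (s0 :: tail) 0).map (fun x => (x : Int))))
            = (((s0 :: tail).zipIdx.map Prod.fst).map (fun syn => if syn ≠ s0 then some (0 : Int)
                else (pvFirstDiff s0 (s0 :: tail) 0).map (fun x => (x : Int)))) := by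
          rw [List.zipIdx_map_fst]
        rw [hmap, List.map_map]
        apply List.map_congr_left
        intro p hp
        rw [pvA_loop_eq_find? _ _ p.2 p.1]
        simpa using pv_other_elem s0 tail p hp
    · rw [if_neg (by simp [h1]), if_neg (by simp [h2])]
      have hnone : ∀ p ∈ synsets.zipIdx,
          pvA_loop synsets mode p.2 p.1 (List.range synsets.length) = none := by
        intro p _
        rw [pvA_loop_eq_find? synsets mode p.2 p.1]
        have : (List.range synsets.length).find?
            (fun j => !(p.2 == j) && pvCond mode synsets p.1 j) = none := by
          apply List.find?_eq_none.mpr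
          intro j _
          simp [pvCond, h1, h2]
        rw [this]
        rfl
      calc synsets.zipIdx.map (fun p => pvA_loop synsets mode p.2 p.1 (List.range synsets.length))
          = synsets.zipIdx.map (fun _ => (none : Option Int)) := List.map_congr_left hnone
        _ = List.replicate synsets.length none := by
            rw [List.map_const']
            simp

-- ===== VERDICT (by name: the statement is the Claim_ definition above) =====
theorem pick_donor_indices_py_spec : Claim_equal_pick_donor_indices_py := by
  intro samples mode _
  exact pv_main samples mode
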